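-- pv_equiv track=rewrite | github.com/krflol/the_scriptures | detect_books.py | detect_book_from_snippet
-- ===== SOURCE A (Python) =====
-- from typing import Dict, List, Tuple, Optional
--
-- def detect_book_from_snippet(snippet: str, alias_index: Dict[str, str]) -> Optional[Tuple[str, str]]:
--     """Return (abbr, matched_alias) if detected in the snippet, preferring longest alias match."""
--     if not snippet:
--         return None
--     lower_snippet = snippet.lower()
--
--     # Sort aliases by length descending to prefer more specific matches
--     candidates = sorted(alias_index.keys(), key=len, reverse=True)
--
--     for alias in candidates:
--         if alias and alias in lower_snippet:
--             return alias_index[alias], alias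
--
--     return None
-- ===== SOURCE B (Python) =====
-- from typing import Dict, Optional, Tuple
--
-- def detect_book_from_snippet(snippet: str, alias_index: Dict[str, str]) -> Optional[Tuple[str, str]]:
--     """Single pass over the dict instead of sorting: keep the longest matching
--     non-empty alias, earliest dict entry winning ties."""
--     lower_snippet = snippet.lower()
--     best = None
--     for alias, abbr in alias_index.items():
--         if alias and alias in lower_snippet and (best is None or len(alias) > len(best[1])):
--             best = (abbr, alias)
--     return best
-- ===== Notes on version B (the rewrite author's own statement) =====
-- stated objective: alternative
-- what changed: Replaces the sort-all-aliases-by-length-then-scan-for-first-substring approach by a single max-keeping pass over the dict items (a strictly-longer match replaces the current best, so the earliest entry wins ties, matching A's stable sort); it trades A's early exit at the first match for having no sort and no separate empty-snippet guard.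
import Mathlib
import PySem

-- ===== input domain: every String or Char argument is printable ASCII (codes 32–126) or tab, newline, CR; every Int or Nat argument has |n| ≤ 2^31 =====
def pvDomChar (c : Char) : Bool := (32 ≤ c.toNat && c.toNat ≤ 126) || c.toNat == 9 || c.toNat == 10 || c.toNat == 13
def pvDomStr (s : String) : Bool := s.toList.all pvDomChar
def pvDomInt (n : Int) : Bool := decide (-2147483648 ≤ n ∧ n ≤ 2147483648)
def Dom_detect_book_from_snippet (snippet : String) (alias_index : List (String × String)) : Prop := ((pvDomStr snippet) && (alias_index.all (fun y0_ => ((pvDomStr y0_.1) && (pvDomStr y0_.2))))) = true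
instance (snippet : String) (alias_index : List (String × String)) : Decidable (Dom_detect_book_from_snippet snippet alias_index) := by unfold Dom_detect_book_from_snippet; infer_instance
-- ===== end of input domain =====

-- B replaces A's sort-aliases-by-length-then-take-first-substring-match by a single
-- max-keeping pass over the dict items (objective: alternative — no sort, but also no early exit).

-- ===== PORT A =====
-- the 'for alias in candidates' loop of A
def detectBookGoA (d : PySem.Dict String String) (ls : String) : List String → Option (String × String)
  | [] => none
  | a :: rest =>
    if a ≠ "" ∧ PySem.Str.isIn a ls = true then
      (d.get? a).map (fun v => (v, a))   -- alias_index[alias] (always present: a is a key)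
    else detectBookGoA d ls rest

def detect_book_from_snippet (snippet : String) (alias_index : List (String × String)) : Option (String × String) :=
  if snippet = "" then none
  else
    let lower_snippet := PySem.Str.lower snippet
    let d := PySem.Dict.ofList alias_index
    let candidates := PySem.List.sorted d.keys (fun a => PySem.Str.len a) true
    detectBookGoA d lower_snippet candidates

-- ===== PORT B =====
def detect_book_from_snippet_alt (snippet : String) (alias_index : List (String × String)) : Option (String × String) :=
  let lower_snippet := PySem.Str.lower snippet
  (PySem.Dict.ofList alias_index).items.foldl
    (fun best p =>
      if p.1 ≠ "" ∧ PySem.Str.isIn p.1 lower_snippet = true then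
        match best with
        | none => some (p.2, p.1)
        | some q => if PySem.Str.len q.2 < PySem.Str.len p.1 then some (p.2, p.1) else best
      else best)
    none

-- ===== PRECONDITION & SPEC =====
def Spec_detect_book_from_snippet (snippet : String) (alias_index : List (String × String)) (out : Option (String × String)) : Prop := out = detect_book_from_snippet_alt snippet alias_index
instance (snippet : String) (alias_index : List (String × String)) (out : Option (String × String)) : Decidable (Spec_detect_book_from_snippet snippet alias_index out) := by unfold Spec_detect_book_from_snippet; infer_instance

-- ===== CLAIM (what is proved, stated in full; the proofs are below) =====
def Claim_equal_detect_book_from_snippet : Prop := ∀ (snippet : String) (alias_index : List (String × String)), Dom_detect_book_from_snippet snippet alias_index → Spec_detect_book_from_snippet snippet alias_index (detect_book_from_snippet snippet alias_index)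

-- ===== LEMMAS AND PROOFS =====

-- the key-only shape of B's loop body, used to relate the two loops
def detectStep (ls : String) (b : Option String) (k : String) : Option String :=
  if k ≠ "" ∧ PySem.Str.isIn k ls = true then
    match b with
    | none => some k
    | some m => if PySem.Str.len m < PySem.Str.len k then some k else b
  else b

def detectPredB (ls : String) (k : String) : Bool :=
  decide (k ≠ "" ∧ PySem.Str.isIn k ls = true)

theorem detectPredB_true {ls k : String} (h : k ≠ "" ∧ PySem.Str.isIn k ls = true) :
    detectPredB ls k = true := by
  simp only [detectPredB, decide_eq_true_eq]; exact h

theorem detectPredB_false {ls k : String} (h : ¬ (k ≠ "" ∧ PySem.Str.isIn k ls = true)) :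
    ¬ detectPredB ls k = true := by
  simp only [detectPredB, decide_eq_true_eq]; exact h

-- inserting one key into a length-descending list commutes find? with detectStep
theorem find?_insertBy_step (ls : String) (x : String) (acc : List String)
    (h : acc.Pairwise (fun a b => PySem.Str.len b ≤ PySem.Str.len a)) :
    List.find? (detectPredB ls)
      (PySem.List.insertBy (fun a b => decide (PySem.Str.len b < PySem.Str.len a)) x acc)
        = detectStep ls (List.find? (detectPredB ls) acc) x := by
  induction acc with
  | nil =>
    by_cases hx : x ≠ "" ∧ PySem.Str.isIn x ls = true
    · rw [PySem.List.insertBy, List.find?_cons_of_pos (detectPredB_true hx)]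
      unfold detectStep
      rw [List.find?_nil, if_pos hx]
    · rw [PySem.List.insertBy, List.find?_cons_of_neg (detectPredB_false hx)]
      unfold detectStep
      rw [if_neg hx]
  | cons a t ih =>
    rcases List.pairwise_cons.mp h with ⟨ha, ht⟩
    by_cases hlt : PySem.Str.len a < PySem.Str.len x
    · have hins : PySem.List.insertBy (fun a b => decide (PySem.Str.len b < PySem.Str.len a)) x (a :: t)
          = x :: a :: t := by
        rw [PySem.List.insertBy, if_pos (by simpa using hlt)]
      rw [hins]
      by_cases hx : x ≠ "" ∧ PySem.Str.isIn x ls = true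
      · rw [List.find?_cons_of_pos (detectPredB_true hx)]
        unfold detectStep
        rw [if_pos hx]
        cases hfind : List.find? (detectPredB ls) (a :: t) with
        | none => rfl
        | some m =>
          have hma : m ∈ a :: t := List.mem_of_find?_eq_some hfind
          have hmlt : PySem.Str.len m < PySem.Str.len x := by
            rcases List.mem_cons.mp hma with rfl | hm
            · exact hlt
            · exact lt_of_le_of_lt (ha m hm) hlt
          show some x = if PySem.Str.len m < PySem.Str.len x then some x else some m
          rw [if_pos hmlt]
      · rw [List.find?_cons_of_neg (detectPredB_false hx)]
        unfold detectStep
        rw [if_neg hx]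
    · have hins : PySem.List.insertBy (fun a b => decide (PySem.Str.len b < PySem.Str.len a)) x (a :: t)
          = a :: PySem.List.insertBy (fun a b => decide (PySem.Str.len b < PySem.Str.len a)) x t := by
        rw [PySem.List.insertBy, if_neg (by simpa using hlt)]
      rw [hins]
      by_cases hpa : detectPredB ls a = true
      · rw [List.find?_cons_of_pos hpa, List.find?_cons_of_pos hpa]
        unfold detectStep
        by_cases hx : x ≠ "" ∧ PySem.Str.isIn x ls = true
        · rw [if_pos hx]
          show some a = if PySem.Str.len a < PySem.Str.len x then some x else some a
          rw [if_neg hlt]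
        · rw [if_neg hx]
      · rw [List.find?_cons_of_neg hpa, List.find?_cons_of_neg hpa]
        exact ih ht

-- find? over the stable descending sort = the max-keeping fold over the keys
theorem find?_sorted_eq_foldl (ls : String) (ks : List String) :
    List.find? (detectPredB ls) (PySem.List.sorted ks (fun a => PySem.Str.len a) true)
      = ks.foldl (detectStep ls) none := by
  induction ks using List.reverseRecOn with
  | nil => rfl
  | append_singleton t x ih =>
    rw [PySem.List.sorted_rev_eq_foldl_insertBy, List.foldl_append, List.foldl_append]
    simp only [List.foldl_cons, List.foldl_nil]
    rw [← PySem.List.sorted_rev_eq_foldl_insertBy]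
    rw [find?_insertBy_step ls x _ (PySem.List.sorted_pairwise_rev t _), ih]

-- A's loop is find? followed by the dict lookup
theorem goA_eq_find? (d : PySem.Dict String String) (ls : String) (cs : List String) :
    detectBookGoA d ls cs
      = (List.find? (detectPredB ls) cs).bind (fun k => (d.get? k).map (fun v => (v, k))) := by
  induction cs with
  | nil => rfl
  | cons a rest ih =>
    by_cases ha : a ≠ "" ∧ PySem.Str.isIn a ls = true
    · rw [detectBookGoA, if_pos ha, List.find?_cons_of_pos (detectPredB_true ha), Option.bind_some]
    · rw [detectBookGoA, if_neg ha, List.find?_cons_of_neg (detectPredB_false ha), ih]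

-- B's fold over the items tracks the key-only fold over the keys
theorem foldl_items_rel (d : PySem.Dict String String) (ls : String)
    (items : List (String × String)) (hv : ∀ p ∈ items, d.get? p.1 = some p.2)
    (bp : Option (String × String)) (bk : Option String)
    (hrel : (bk = none ∧ bp = none) ∨
      (∃ m v, bk = some m ∧ d.get? m = some v ∧ bp = some (v, m))) :
    (((items.map Prod.fst).foldl (detectStep ls) bk) = none ∧
      items.foldl
        (fun best p =>
          if p.1 ≠ "" ∧ PySem.Str.isIn p.1 ls = true then
            match best with
            | none => some (p.2, p.1)
            | some q => if PySem.Str.len q.2 < PySem.Str.len p.1 then some (p.2, p.1) else best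
          else best) bp = none) ∨
    (∃ m v, ((items.map Prod.fst).foldl (detectStep ls) bk) = some m ∧ d.get? m = some v ∧
      items.foldl
        (fun best p =>
          if p.1 ≠ "" ∧ PySem.Str.isIn p.1 ls = true then
            match best with
            | none => some (p.2, p.1)
            | some q => if PySem.Str.len q.2 < PySem.Str.len p.1 then some (p.2, p.1) else best
          else best) bp = some (v, m)) := by
  induction items generalizing bp bk with
  | nil => simpa using hrel
  | cons p rest ih =>
    simp only [List.foldl_cons, List.map_cons]
    refine ih (fun q hq => hv q (List.mem_cons_of_mem _ hq)) _ _ ?_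
    have hp1 : d.get? p.1 = some p.2 := hv p (List.mem_cons_self)
    by_cases hc : p.1 ≠ "" ∧ PySem.Str.isIn p.1 ls = true
    · rcases hrel with ⟨hbk, hbp⟩ | ⟨m, v, hbk, hm, hbp⟩
      · subst hbk; subst hbp
        rw [if_pos hc]
        unfold detectStep
        rw [if_pos hc]
        exact Or.inr ⟨p.1, p.2, rfl, hp1, rfl⟩
      · subst hbk; subst hbp
        rw [if_pos hc]
        unfold detectStep
        rw [if_pos hc]
        by_cases hl : PySem.Str.len m < PySem.Str.len p.1
        · refine Or.inr ⟨p.1, p.2, ?_, hp1, ?_⟩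
          · show (if PySem.Str.len m < PySem.Str.len p.1 then some p.1 else some m) = some p.1
            rw [if_pos hl]
          · show (if PySem.Str.len (v, m).2 < PySem.Str.len p.1 then some (p.2, p.1) else some (v, m))
                = some (p.2, p.1)
            rw [if_pos hl]
        · refine Or.inr ⟨m, v, ?_, hm, ?_⟩
          · show (if PySem.Str.len m < PySem.Str.len p.1 then some p.1 else some m) = some m
            rw [if_neg hl]
          · show (if PySem.Str.len (v, m).2 < PySem.Str.len p.1 then some (p.2, p.1) else some (v, m))
                = some (v, m)
            rw [if_neg hl]
    · rw [if_neg hc]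
      unfold detectStep
      rw [if_neg hc]
      exact hrel

-- on the empty snippet, B's loop condition never fires (no non-empty substring of "")
theorem foldl_items_empty (items : List (String × String)) :
    items.foldl
      (fun best p =>
        if p.1 ≠ "" ∧ PySem.Str.isIn p.1 (PySem.Str.lower "") = true then
          match best with
          | none => some (p.2, p.1)
          | some q => if PySem.Str.len q.2 < PySem.Str.len p.1 then some (p.2, p.1) else best
        else best) none = none := by
  induction items with
  | nil => rfl
  | cons p rest ih =>
    rw [List.foldl_cons, if_neg, ih]
    rintro ⟨h1, h2⟩
    rw [show PySem.Str.lower "" = "" from rfl, PySem.Str.isIn_iff_infix] at h2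
    simp only [String.toList_empty, List.infix_nil] at h2
    exact h1 (by cases p.1; simp_all)

-- ===== VERDICT (by name: the statement is the Claim_ definition above) =====
theorem detect_book_from_snippet_spec : Claim_equal_detect_book_from_snippet := by
  intro snippet alias_index _
  unfold Spec_detect_book_from_snippet detect_book_from_snippet detect_book_from_snippet_alt
  by_cases hs : snippet = ""
  · subst hs
    rw [if_pos rfl]
    exact (foldl_items_empty _).symm
  · simp only [if_neg hs]
    set d := PySem.Dict.ofList alias_index with hd
    set ls := PySem.Str.lower snippet with hls
    have hnd : d.keys.Nodup := PySem.Dict.nodup_keys_ofList alias_index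
    have hv : ∀ p ∈ d.items, d.get? p.1 = some p.2 := by
      intro p hp
      exact PySem.Dict.get?_of_mem_items d hp hnd
    rw [goA_eq_find?, find?_sorted_eq_foldl]
    have hkeys : d.keys = d.items.map Prod.fst := rfl
    rw [hkeys]
    rcases foldl_items_rel d ls d.items hv none none (Or.inl ⟨rfl, rfl⟩) with
      ⟨hK, hP⟩ | ⟨m, v, hK, hm, hP⟩
    · rw [hK, hP]
      rfl
    · rw [hK, hP, Option.bind_some, hm, Option.map_some]
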